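-- pv_equiv track=rewrite | github.com/sambanova/ai-starter-kit | benchmarking/notebooks/generate_batch_size_grafana.py | get_dominant
-- ===== SOURCE A (Python) =====
-- from typing import Any, Dict, List, Optional, Tuple
--
-- def get_dominant(groupings: List[Dict[int, int]]) -> Optional[int]:
--     if not groupings:
--         return None
--
--     # Flatten all dictionaries into key-value pairs
--     all_items: List[Tuple[int, int]] = []
--     for d in groupings:
--         all_items.extend(d.items())
--
--     if not all_items:
--         return None
--
--     # Find maximum count value
--     max_count = max(count for _, count in all_items)
--
--     # Get keys with max count, then return max key if tie
--     candidate_keys = [key for key, count in all_items if count == max_count]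
--     return max(candidate_keys)  # Returns highest batch size if tie
-- ===== SOURCE B (Python) =====
-- def get_dominant(groupings):
--     if not groupings:
--         return None
--     best = None  # (count, key) of the best pair seen so far
--     for d in groupings:
--         for key, count in d.items():
--             if best is None or (count, key) > best:
--                 best = (count, key)
--     return best[1] if best is not None else None
-- ===== Notes on version B (the rewrite author's own statement) =====
-- stated objective: simpler
-- what changed: Replaces A's three passes (flatten into a list, max over counts, filter candidate keys, max over keys) by a single streaming pass that keeps only the current best (count, key) pair under lexicographic comparison, building no intermediate lists.
import Mathlib
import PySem

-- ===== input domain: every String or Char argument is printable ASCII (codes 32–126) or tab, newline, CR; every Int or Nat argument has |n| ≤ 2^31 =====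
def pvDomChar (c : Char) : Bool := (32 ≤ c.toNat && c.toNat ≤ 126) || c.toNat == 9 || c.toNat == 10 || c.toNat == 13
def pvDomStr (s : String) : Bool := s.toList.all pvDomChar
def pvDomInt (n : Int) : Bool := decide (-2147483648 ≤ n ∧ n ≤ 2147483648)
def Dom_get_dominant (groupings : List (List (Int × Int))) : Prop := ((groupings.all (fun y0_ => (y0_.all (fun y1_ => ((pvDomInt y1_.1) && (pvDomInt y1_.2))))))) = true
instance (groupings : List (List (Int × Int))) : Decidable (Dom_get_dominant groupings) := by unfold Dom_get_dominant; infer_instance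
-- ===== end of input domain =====

-- B replaces A's multi-pass flatten/max/filter/max by a single streaming pass keeping the best (count, key) pair; same O(n), simpler.


-- ===== PORT A =====
def get_dominant (groupings : List (List (Int × Int))) : Option Int :=
  if groupings.isEmpty then none
  else
    -- all_items: extend over each dict's items
    let allItems : List (Int × Int) := groupings.foldl (fun acc d => acc ++ d) []
    if allItems.isEmpty then none
    else
      -- max(count for _, count in all_items); the none branch is unreachable (allItems nonempty)
      match PySem.List.max? (allItems.map (fun kv => kv.2)) id with
      | none => none
      | some maxCount =>
        let candidateKeys : List Int := (allItems.filter (fun kv => kv.2 == maxCount)).map (fun kv => kv.1)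
        PySem.List.max? candidateKeys id

-- ===== PORT B =====
-- one step of B's loop: replace best when best is None or (count, key) > best lexicographically
def pvBStep (best : Option (Int × Int)) (kv : Int × Int) : Option (Int × Int) :=
  match best with
  | none => some (kv.2, kv.1)
  | some b => if b.1 < kv.2 ∨ (b.1 = kv.2 ∧ b.2 < kv.1) then some (kv.2, kv.1) else some b

def get_dominant_alt (groupings : List (List (Int × Int))) : Option Int :=
  if groupings.isEmpty then none
  else ((groupings.foldl (fun best d => d.foldl pvBStep best) none).map (fun b => b.2))

-- ===== PRECONDITION & SPEC =====
def Spec_get_dominant (groupings : List (List (Int × Int))) (out : Option Int) : Prop := out = get_dominant_alt groupings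
instance (groupings : List (List (Int × Int))) (out : Option Int) : Decidable (Spec_get_dominant groupings out) := by unfold Spec_get_dominant; infer_instance

-- ===== CLAIM (what is proved, stated in full; the proofs are below) =====
def Claim_equal_get_dominant : Prop := ∀ (groupings : List (List (Int × Int))), Dom_get_dominant groupings → Spec_get_dominant groupings (get_dominant groupings)

-- ===== LEMMAS AND PROOFS =====

-- pure version of pvBStep once best is some
def pvF (b : Int × Int) (kv : Int × Int) : Int × Int :=
  if b.1 < kv.2 ∨ (b.1 = kv.2 ∧ b.2 < kv.1) then (kv.2, kv.1) else b

-- lexicographic ≤ on (count, key)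
def pvLe (u v : Int × Int) : Prop := u.1 < v.1 ∨ (u.1 = v.1 ∧ u.2 ≤ v.2)

lemma pvLe_trans {u v w : Int × Int} (h1 : pvLe u v) (h2 : pvLe v w) : pvLe u w := by
  unfold pvLe at *; omega

lemma pvLe_pvF_left (b kv : Int × Int) : pvLe b (pvF b kv) := by
  unfold pvF pvLe; split_ifs <;> omega

lemma pvLe_pvF_right (b kv : Int × Int) : pvLe (kv.2, kv.1) (pvF b kv) := by
  unfold pvF pvLe; split_ifs <;> simp_all <;> omega

lemma foldl_pvBStep_some (xs : List (Int × Int)) : ∀ b : Int × Int,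
    xs.foldl pvBStep (some b) = some (xs.foldl pvF b) := by
  induction xs with
  | nil => intro b; rfl
  | cons x xs ih =>
    intro b
    have hstep : pvBStep (some b) x = some (pvF b x) := by
      show (if b.1 < x.2 ∨ (b.1 = x.2 ∧ b.2 < x.1) then some (x.2, x.1) else some b) = _
      unfold pvF; split_ifs <;> rfl
    simp only [List.foldl_cons, hstep, ih]

lemma foldl_pvF_spec (xs : List (Int × Int)) : ∀ b : Int × Int,
    (xs.foldl pvF b = b ∨ ∃ kv ∈ xs, xs.foldl pvF b = (kv.2, kv.1)) ∧
    pvLe b (xs.foldl pvF b) ∧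
    (∀ kv ∈ xs, pvLe (kv.2, kv.1) (xs.foldl pvF b)) := by
  induction xs with
  | nil =>
    intro b
    refine ⟨Or.inl rfl, ?_, by simp⟩
    simp only [List.foldl_nil]
    unfold pvLe; omega
  | cons x xs ih =>
    intro b
    obtain ⟨hmem, hle, hall⟩ := ih (pvF b x)
    simp only [List.foldl_cons]
    refine ⟨?_, ?_, ?_⟩
    · rcases hmem with h | ⟨kv, hkv, h⟩
      · rw [h]
        unfold pvF
        split_ifs with hc
        · exact Or.inr ⟨x, by simp⟩
        · exact Or.inl rfl
      · exact Or.inr ⟨kv, List.mem_cons_of_mem _ hkv, h⟩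
    · exact pvLe_trans (pvLe_pvF_left b x) hle
    · intro kv hkv
      rcases List.mem_cons.mp hkv with h | h
      · subst h; exact pvLe_trans (pvLe_pvF_right b kv) hle
      · exact hall kv h

-- a max? over a nonempty list is some
lemma pv_foldl_max_some {α κ : Type} [LT κ] [DecidableLT κ] (key : α → κ)
    (xs : List α) : ∀ a : α, ∃ m,
    List.foldl (fun acc y => match acc with | none => some y | some mm => if key mm < key y then some y else some mm)
      (some a) xs = some m := by
  induction xs with
  | nil => intro a; exact ⟨a, rfl⟩
  | cons x xs ih =>
    intro a
    simp only [List.foldl_cons]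
    by_cases h : key a < key x
    · simpa [h] using ih x
    · simpa [h] using ih a

lemma pv_max?_cons_some {α κ : Type} [LT κ] [DecidableLT κ] (key : α → κ)
    (x : α) (xs : List α) : ∃ m, PySem.List.max? (x :: xs) key = some m := by
  unfold PySem.List.max?
  simpa using pv_foldl_max_some key xs x

-- B's nested fold is the fold over the flattened items
lemma pv_alt_fold (groupings : List (List (Int × Int))) :
    groupings.foldl (fun best d => d.foldl pvBStep best) none
      = groupings.flatten.foldl pvBStep none := by
  rw [List.foldl_flatten]

-- A's accumulated all_items is the flattened list
lemma pv_allItems (groupings : List (List (Int × Int))) :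
    groupings.foldl (fun acc d => acc ++ d) [] = groupings.flatten := by
  simpa using PySem.List.foldl_append_eq_flatMap (fun d => d) groupings []

-- main equivalence on a nonempty flattened item list
lemma pv_main (x : Int × Int) (xs : List (Int × Int)) :
    (match PySem.List.max? ((x :: xs).map (fun kv => kv.2)) id with
      | none => (none : Option Int)
      | some maxCount =>
        PySem.List.max? (((x :: xs).filter (fun kv => kv.2 == maxCount)).map (fun kv => kv.1)) id)
    = ((x :: xs).foldl pvBStep none).map (fun b => b.2) := by
  -- B side: the fold is some r with the lex-max properties
  have hfold : (x :: xs).foldl pvBStep none = some (xs.foldl pvF (x.2, x.1)) := by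
    simp only [List.foldl_cons]
    have : pvBStep none x = some (x.2, x.1) := rfl
    rw [this, foldl_pvBStep_some]
  set r := xs.foldl pvF (x.2, x.1) with hr
  obtain ⟨hmem, hle, hall⟩ := foldl_pvF_spec xs (x.2, x.1)
  -- r is the swap of some element of x :: xs
  have hrmem : ∃ kv ∈ x :: xs, r = (kv.2, kv.1) := by
    rcases hmem with h | ⟨kv, hkv, h⟩
    · exact ⟨x, List.mem_cons_self, h⟩
    · exact ⟨kv, List.mem_cons_of_mem _ hkv, h⟩
  have hallc : ∀ kv ∈ x :: xs, pvLe (kv.2, kv.1) r := by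
    intro kv hkv
    rcases List.mem_cons.mp hkv with h | h
    · subst h; exact hle
    · exact hall kv h
  obtain ⟨kv₀, hkv₀, hr₀⟩ := hrmem
  -- A side: max over counts is some m, and m = r.1
  obtain ⟨m, hm⟩ := pv_max?_cons_some (id : Int → Int) x.2 (xs.map (fun kv => kv.2))
  have hm' : PySem.List.max? ((x :: xs).map (fun kv => kv.2)) id = some m := by
    simpa using hm
  have hmmax := PySem.List.max?_isMax hm'
  have hmmem := PySem.List.max?_mem hm'
  have hmr : m = r.1 := by
    have h1 : m ≤ r.1 := by
      simp only [List.mem_map] at hmmem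
      obtain ⟨kv, hkv, hkvm⟩ := hmmem
      have := hallc kv hkv
      unfold pvLe at this; omega
    have h2 : r.1 ≤ m := by
      have hmem2 : kv₀.2 ∈ (x :: xs).map (fun kv => kv.2) := List.mem_map_of_mem hkv₀
      have h3 := hmmax _ hmem2
      have h4 : r.1 = kv₀.2 := by rw [hr₀]
      simp only [id] at h3
      omega
    omega
  -- candidate keys: r.2 is a member, every member is ≤ r.2
  have hcmem : r.2 ∈ ((x :: xs).filter (fun kv => kv.2 == m)).map (fun kv => kv.1) := by
    simp only [List.mem_map, List.mem_filter]
    exact ⟨kv₀, ⟨hkv₀, by simp [hmr, hr₀]⟩, by rw [hr₀]⟩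
  -- max over candidate keys is some k = r.2
  obtain ⟨c0, cs, hcs⟩ := List.exists_cons_of_ne_nil (List.ne_nil_of_mem hcmem)
  obtain ⟨k, hk⟩ := pv_max?_cons_some (id : Int → Int) c0 cs
  have hk' : PySem.List.max? (((x :: xs).filter (fun kv => kv.2 == m)).map (fun kv => kv.1)) id = some k := by
    rw [hcs]; exact hk
  have hkmax := PySem.List.max?_isMax hk'
  have hkmem := PySem.List.max?_mem hk'
  have hkr : k = r.2 := by
    have h1 : k ≤ r.2 := by
      simp only [List.mem_map, List.mem_filter] at hkmem
      obtain ⟨kv, ⟨hkvl, hkvc⟩, hkvk⟩ := hkmem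
      have := hallc kv hkvl
      unfold pvLe at this
      simp only [beq_iff_eq] at hkvc
      omega
    have h2 : r.2 ≤ k := by
      have := hkmax _ hcmem
      simpa using this
    omega
  rw [hm']
  show PySem.List.max? (((x :: xs).filter (fun kv => kv.2 == m)).map (fun kv => kv.1)) id
      = ((x :: xs).foldl pvBStep none).map (fun b => b.2)
  rw [hk', hkr, hfold]
  rfl

-- ===== VERDICT (by name: the statement is the Claim_ definition above) =====
theorem get_dominant_spec : Claim_equal_get_dominant := by
  intro groupings _
  unfold Spec_get_dominant get_dominant get_dominant_alt
  by_cases hg : groupings.isEmpty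
  · simp [hg]
  · simp only [hg, Bool.false_eq_true, if_false]
    rw [pv_allItems, pv_alt_fold]
    cases h : groupings.flatten with
    | nil => simp
    | cons x xs =>
      simp only [List.isEmpty_cons, if_false, Bool.false_eq_true]
      exact pv_main x xs
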